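-- pv_equiv track=rewrite | github.com/chengalex211/UNICC-AI_AGENT | UNICC-Project-2/Expert1/fetch_aiid_data.py | pick_primary_domain
-- ===== SOURCE A (Python) =====
-- def pick_primary_domain(domains: list[str]) -> str:
--     """Pick single primary domain using priority ordering."""
--     priority = [
--         "security_adversarial",
--         "autonomous_agent",
--         "automated_decision",
--         "humanitarian_aid",
--         "nlp_llm",
--         "content_moderation",
--         "document_intelligence",
--     ]
--     for d in priority:
--         if d in domains:
--             return d
--     return domains[0] if domains else "nlp_llm"
-- ===== SOURCE B (Python) =====
-- def pick_primary_domain(domains: list[str]) -> str: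
--     """Pick single primary domain using priority ordering."""
--     priority = [
--         "security_adversarial",
--         "autonomous_agent",
--         "automated_decision",
--         "humanitarian_aid",
--         "nlp_llm",
--         "content_moderation",
--         "document_intelligence",
--     ]
--     rank = {name: i for i, name in enumerate(priority)}
--     best = None  # (rank, name) with the smallest rank seen so far
--     for d in domains:
--         r = rank.get(d)
--         if r is not None and (best is None or r < best[0]):
--             best = (r, d)
--     if best is not None:
--         return best[1]
--     return domains[0] if domains else "nlp_llm"
-- ===== Notes on version B (the rewrite author's own statement) =====
-- stated objective: alternative
-- what changed: A scans the fixed priority list and tests membership of each name in domains; B builds a rank dictionary from the priority list and makes a single pass over domains keeping the lowest-ranked match, falling back to domains[0] or 'nlp_llm'.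
import Mathlib
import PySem

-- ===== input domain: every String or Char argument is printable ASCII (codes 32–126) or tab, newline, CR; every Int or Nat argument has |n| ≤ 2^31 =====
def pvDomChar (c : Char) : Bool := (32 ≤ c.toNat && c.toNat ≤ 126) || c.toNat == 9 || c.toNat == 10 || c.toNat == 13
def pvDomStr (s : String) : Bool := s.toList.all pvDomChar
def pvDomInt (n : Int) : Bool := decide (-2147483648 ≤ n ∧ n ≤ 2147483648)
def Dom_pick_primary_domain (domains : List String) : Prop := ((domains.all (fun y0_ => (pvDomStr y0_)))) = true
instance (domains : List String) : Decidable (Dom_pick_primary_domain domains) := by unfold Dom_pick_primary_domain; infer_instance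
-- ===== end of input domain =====

-- B replaces A's scan over the fixed priority list (membership test per priority name)
-- by a rank dictionary and a single left fold over `domains` keeping the best-ranked
-- domain seen so far; objective: alternative (one pass over the input instead of
-- membership scans per priority name).


-- ===== PORT A =====
def pvPriorityA : List String :=
  ["security_adversarial", "autonomous_agent", "automated_decision",
   "humanitarian_aid", "nlp_llm", "content_moderation", "document_intelligence"]

-- the `for d in priority: if d in domains: return d` loop
def pvPickLoopA : List String → List String → Option String
  | [], _ => none
  | d :: rest, domains =>
      if domains.contains d then some d else pvPickLoopA rest domains

def pick_primary_domain (domains : List String) : String :=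
  match pvPickLoopA pvPriorityA domains with
  | some d => d
  | none => match domains with
            | [] => "nlp_llm"
            | d0 :: _ => d0

-- ===== PORT B =====
def pvPriorityB : List String :=
  ["security_adversarial", "autonomous_agent", "automated_decision",
   "humanitarian_aid", "nlp_llm", "content_moderation", "document_intelligence"]

-- rank = {name: i for i, name in enumerate(priority)}
def pvRankB : PySem.Dict String Int :=
  (PySem.List.enumerate pvPriorityB).foldl (fun acc p => acc.insert p.2 p.1) PySem.Dict.empty

-- one step of B's loop body
def pvStepB (best : Option (Int × String)) (d : String) : Option (Int × String) :=
  match pvRankB.get? d with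
  | none => best
  | some r =>
      match best with
      | none => some (r, d)
      | some (br, bd) => if r < br then some (r, d) else some (br, bd)

def pick_primary_domain_alt (domains : List String) : String :=
  match domains.foldl pvStepB none with
  | some (_, name) => name
  | none => match domains with
            | [] => "nlp_llm"
            | d0 :: _ => d0

-- ===== PRECONDITION & SPEC =====
def Spec_pick_primary_domain (domains : List String) (out : String) : Prop := out = pick_primary_domain_alt domains
instance (domains : List String) (out : String) : Decidable (Spec_pick_primary_domain domains out) := by unfold Spec_pick_primary_domain; infer_instance

-- ===== CLAIM (what is proved, stated in full; the proofs are below) =====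
def Claim_equal_pick_primary_domain : Prop := ∀ (domains : List String), Dom_pick_primary_domain domains → Spec_pick_primary_domain domains (pick_primary_domain domains)

-- ===== LEMMAS AND PROOFS =====

-- first-minimum merge: keep the left element unless the right has strictly smaller rank
def pvMerge : Option (Int × String) → Option (Int × String) → Option (Int × String)
  | none, b => b
  | some a, none => some a
  | some (x, dx), some (y, dy) => if y < x then some (y, dy) else some (x, dx)

-- the (rank, name) pairs of the priority list
def pvPairs : List (Int × String) :=
  [(0, "security_adversarial"), (1, "autonomous_agent"), (2, "automated_decision"),
   (3, "humanitarian_aid"), (4, "nlp_llm"), (5, "content_moderation"),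
   (6, "document_intelligence")]

-- A's scan, carrying the rank alongside the name
def pvChain : List (Int × String) → List String → Option (Int × String)
  | [], _ => none
  | (r, n) :: ps, domains =>
      if domains.contains n then some (r, n) else pvChain ps domains

-- first pair whose name is d
def pvLookup : List (Int × String) → String → Option (Int × String)
  | [], _ => none
  | (r, n) :: ps, d => if n = d then some (r, n) else pvLookup ps d

lemma pvMerge_none_right (a : Option (Int × String)) : pvMerge a none = a := by
  cases a <;> rfl

lemma pvMerge_assoc (a b c : Option (Int × String)) :
    pvMerge (pvMerge a b) c = pvMerge a (pvMerge b c) := by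
  rcases a with _ | ⟨x, dx⟩
  · rfl
  rcases b with _ | ⟨y, dy⟩
  · rw [pvMerge_none_right]; rfl
  rcases c with _ | ⟨z, dz⟩
  · rw [pvMerge_none_right, pvMerge_none_right]
  by_cases h1 : y < x <;> by_cases h2 : z < y <;> by_cases h3 : z < x <;>
    simp [pvMerge, h1, h2, h3] <;> omega

lemma pvChain_mem {pairs : List (Int × String)} {doms : List String} {p : Int × String}
    (h : pvChain pairs doms = some p) : p ∈ pairs := by
  induction pairs with
  | nil => simp [pvChain] at h
  | cons q ps ih =>
      obtain ⟨r, n⟩ := q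
      unfold pvChain at h
      split_ifs at h with hc
      · simp_all
      · exact List.mem_cons_of_mem _ (ih h)

lemma pvLookup_mem {pairs : List (Int × String)} {d : String} {p : Int × String}
    (h : pvLookup pairs d = some p) : p ∈ pairs ∧ p.2 = d := by
  induction pairs with
  | nil => simp [pvLookup] at h
  | cons q ps ih =>
      obtain ⟨r, n⟩ := q
      unfold pvLookup at h
      split_ifs at h with hc
      · obtain rfl := Option.some_inj.mp h |>.symm
        exact ⟨List.mem_cons_self, hc⟩
      · exact ⟨List.mem_cons_of_mem _ (ih h).1, (ih h).2⟩

-- peel one domain off A's scan: the scan of d :: rest is the merge of d's rank with the scan of rest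
lemma pvChain_cons (pairs : List (Int × String))
    (hsorted : pairs.Pairwise (fun p q => p.1 < q.1)) (d : String) (rest : List String) :
    pvChain pairs (d :: rest) = pvMerge (pvLookup pairs d) (pvChain pairs rest) := by
  induction pairs with
  | nil => rfl
  | cons q ps ih =>
      obtain ⟨r, n⟩ := q
      have hps := (List.pairwise_cons.mp hsorted).2
      have hlt : ∀ p ∈ ps, r < p.1 := (List.pairwise_cons.mp hsorted).1
      by_cases hn : d = n
      · subst hn
        have h1 : pvChain ((r, d) :: ps) (d :: rest) = some (r, d) := by
          simp [pvChain]
        have h2 : pvLookup ((r, d) :: ps) d = some (r, d) := by simp [pvLookup]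
        rw [h1, h2]
        rcases hc : pvChain ((r, d) :: ps) rest with _ | ⟨r', n'⟩
        · rfl
        · have hmem := pvChain_mem hc
          have : ¬ r' < r := by
            rcases List.mem_cons.mp hmem with h | h
            · simp_all
            · have := hlt _ h; simp at this; omega
          simp [pvMerge, this]
      · have hL : pvChain ((r, n) :: ps) (d :: rest) =
            if n ∈ rest then some (r, n) else pvChain ps (d :: rest) := by
          simp [pvChain, Ne.symm hn]
        have hlk : pvLookup ((r, n) :: ps) d = pvLookup ps d := by
          simp [pvLookup, Ne.symm hn]
        by_cases hc : n ∈ rest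
        · have hR : pvChain ((r, n) :: ps) rest = some (r, n) := by simp [pvChain, hc]
          rw [hL, hlk, hR, if_pos hc]
          rcases hlkv : pvLookup ps d with _ | ⟨r'', n''⟩
          · rfl
          · have hmem := pvLookup_mem hlkv
            have : r < r'' := hlt _ hmem.1
            simp [pvMerge, this]
        · have hR : pvChain ((r, n) :: ps) rest = pvChain ps rest := by
            simp [pvChain, hc]
          rw [hL, hlk, hR, if_neg hc, ih hps]

lemma pvPairs_sorted : pvPairs.Pairwise (fun p q => p.1 < q.1) := by decide

-- B's dictionary lookup, paired with the name, is pvLookup on the pairs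
lemma pvGet_eq_lookup (d : String) :
    (pvRankB.get? d).map (fun r => (r, d)) = pvLookup pvPairs d := by
  by_cases h0 : d = "security_adversarial"
  · subst h0; rfl
  by_cases h1 : d = "autonomous_agent"
  · subst h1; rfl
  by_cases h2 : d = "automated_decision"
  · subst h2; rfl
  by_cases h3 : d = "humanitarian_aid"
  · subst h3; rfl
  by_cases h4 : d = "nlp_llm"
  · subst h4; rfl
  by_cases h5 : d = "content_moderation"
  · subst h5; rfl
  by_cases h6 : d = "document_intelligence"
  · subst h6; rfl
  have hget : pvRankB.get? d = none := by
    show (PySem.Dict.get? _ d) = none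
    simp [pvRankB, pvPriorityB, PySem.List.enumerate, PySem.Dict.get?_insert_of_ne,
          h0, h1, h2, h3, h4, h5, h6]
  simp [hget, pvLookup, pvPairs, Ne.symm h0, Ne.symm h1, Ne.symm h2, Ne.symm h3,
        Ne.symm h4, Ne.symm h5, Ne.symm h6]

lemma pvStepB_eq_merge (best : Option (Int × String)) (d : String) :
    pvStepB best d = pvMerge best (pvLookup pvPairs d) := by
  rw [← pvGet_eq_lookup]
  unfold pvStepB
  rcases h : pvRankB.get? d with _ | r
  · simp [pvMerge_none_right]
  · rcases best with _ | ⟨br, bd⟩ <;> simp [pvMerge]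

-- B's fold computes A's scan (generalized over the accumulator)
lemma pvFoldB_eq (domains : List String) :
    ∀ acc, domains.foldl pvStepB acc = pvMerge acc (pvChain pvPairs domains) := by
  induction domains with
  | nil =>
      intro acc
      rw [show pvChain pvPairs [] = none from rfl, pvMerge_none_right]; rfl
  | cons d rest ih =>
      intro acc
      rw [List.foldl_cons, ih, pvStepB_eq_merge, pvMerge_assoc,
          ← pvChain_cons pvPairs pvPairs_sorted]

lemma pvPickA_eq (domains : List String) :
    pvPickLoopA pvPriorityA domains = (pvChain pvPairs domains).map (fun p => p.2) := by
  simp only [pvPriorityA, pvPickLoopA, pvChain, pvPairs]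
  split_ifs <;> rfl

-- ===== VERDICT (by name: the statement is the Claim_ definition above) =====
theorem pick_primary_domain_spec : Claim_equal_pick_primary_domain := by
  intro domains _
  show pick_primary_domain domains = pick_primary_domain_alt domains
  unfold pick_primary_domain pick_primary_domain_alt
  rw [pvPickA_eq, pvFoldB_eq]
  rcases h : pvChain pvPairs domains with _ | ⟨r, name⟩ <;> simp [pvMerge]
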